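-- pv_equiv track=rewrite | github.com/rachelbasse/kaggle-recipes | feature_helpers.py | get_target_feature
-- ===== SOURCE A (Python) =====
-- def get_target_feature(feature, bad_features, catchall):
--     parts = feature.split('-')
--     if parts[-1] == catchall:
--         target = parts[0]
--     else:
--         parts[-1] = catchall
--         target = '-'.join(parts)
--     if target in bad_features:
--         target = get_target_feature(target, bad_features, catchall)
--     return target
-- ===== SOURCE B (Python) =====
-- def get_target_feature(feature, bad_features, catchall):
--     bad = frozenset(bad_features)
--     parts = feature.split('-')
--     tail = catchall.split('-')
--     while True:
--         if parts[-1] == catchall: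
--             parts = parts[:1]
--         else:
--             parts = parts[:-1] + tail
--         target = '-'.join(parts)
--         if target not in bad:
--             return target
-- ===== Notes on version B (the rewrite author's own statement) =====
-- stated objective: alternative
-- what changed: Replaces A's tail recursion that splits the current string on '-' every round and re-joins it with a while-loop over the parts LIST: feature and catchall are split once, each round edits the parts list (parts[:1] or parts[:-1]+tail) and only joins it for the membership test, so no string is ever re-split; Pre_ excludes only the inputs where A's rewrite chain cycles forever (Python A raises RecursionError there, B loops).
import Mathlib
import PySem

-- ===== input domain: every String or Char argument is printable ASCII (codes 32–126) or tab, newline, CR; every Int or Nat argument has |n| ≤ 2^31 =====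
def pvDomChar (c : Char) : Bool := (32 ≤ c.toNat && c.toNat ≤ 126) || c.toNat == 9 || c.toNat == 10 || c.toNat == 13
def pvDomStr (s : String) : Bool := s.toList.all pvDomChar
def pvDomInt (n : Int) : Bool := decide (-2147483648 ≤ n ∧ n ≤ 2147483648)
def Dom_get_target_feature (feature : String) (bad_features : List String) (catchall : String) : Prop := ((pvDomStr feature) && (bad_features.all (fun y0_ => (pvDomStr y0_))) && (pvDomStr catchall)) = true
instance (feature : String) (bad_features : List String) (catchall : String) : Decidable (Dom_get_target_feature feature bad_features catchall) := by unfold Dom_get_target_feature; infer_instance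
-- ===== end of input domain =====

-- B replaces A's string-rewriting tail recursion by a while-loop over the PARTS LIST: the
-- feature and the catchall are each split on '-' once, the loop edits the parts list and
-- only joins it to test membership, so no string is ever re-split (objective: alternative).

-- ===== PORT A =====
-- one round of A's body: split on '-', rewrite, re-join
def gtfAstep (t c : List Char) : List Char :=
  let parts := PySem.Chars.splitOn t ['-']
  if PySem.List.pyGetD parts (-1) [] = c then
    PySem.List.pyGetD parts 0 []
  else
    PySem.Chars.join ['-'] (PySem.List.pySetD parts (-1) c)

-- A's tail recursion; the fuel is only a totality guard: on every input where the Python A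
-- returns (= Pre_ below) its recursion depth is at most bad_features.length + 3, so the
-- fuel-0 branch is never reached there.
def gtfAgo (bad : List (List Char)) (c : List Char) : Nat → List Char → List Char
  | 0, t => t
  | n + 1, t =>
    let target := gtfAstep t c
    if target ∈ bad then gtfAgo bad c n target else target

def get_target_feature (feature : String) (bad_features : List String) (catchall : String) : String :=
  String.ofList (gtfAgo (bad_features.map String.toList) catchall.toList (bad_features.length + 3) feature.toList)

-- ===== PORT B =====
-- one round of B's loop body: edit the parts list (cs = the pre-split catchall)
def gtfBupdate (cs : List (List Char)) (c : List Char) (parts : List (List Char)) : List (List Char) :=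
  if PySem.List.pyGetD parts (-1) [] = c then
    PySem.List.slice parts none (some 1)
  else
    PySem.List.slice parts none (some (-1)) ++ cs

-- B's while-loop over the parts list, with the same totality fuel as A's port
def gtfBgo (bad : PySem.Set (List Char)) (c : List Char) (cs : List (List Char)) :
    Nat → List (List Char) → List Char
  | 0, parts => PySem.Chars.join ['-'] parts
  | n + 1, parts =>
    let parts' := gtfBupdate cs c parts
    let target := PySem.Chars.join ['-'] parts'
    if target ∈ bad then gtfBgo bad c cs n parts' else target

def get_target_feature_alt (feature : String) (bad_features : List String) (catchall : String) : String :=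
  String.ofList (gtfBgo (PySem.Set.ofList (bad_features.map String.toList)) catchall.toList
    (PySem.Chars.splitOn catchall.toList ['-']) (bad_features.length + 3)
    (PySem.Chars.splitOn feature.toList ['-']))

-- ===== PRECONDITION & SPEC =====
-- model of str.split('-') (used by Pre_ and the proofs; not used by either port)
def hS : List Char → List (List Char)
  | [] => [[]]
  | a :: t => if a = '-' then [] :: hS t else (a :: (hS t).headI) :: (hS t).tail

-- one A-round, stated directly on the split model (used only by Pre_ and the proofs)
def pvStep (t c : List Char) : List Char :=
  if (hS t).getLastD [] = c then (hS t).headI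
  else PySem.Chars.join ['-'] ((hS t).dropLast ++ [c])

-- Pre_ excludes exactly the inputs on which A's rewrite chain loops forever (hyphen-free
-- catchall in bad_features and the first two rewrites also bad): Python A raises
-- RecursionError there and returns normally everywhere else.
def Pre_get_target_feature (feature : String) (bad_features : List String) (catchall : String) : Prop :=
  ('-' ∈ catchall.toList) ∨ catchall ∉ bad_features ∨
  String.ofList (pvStep feature.toList catchall.toList) ∉ bad_features ∨
  String.ofList (pvStep (pvStep feature.toList catchall.toList) catchall.toList) ∉ bad_features
instance (feature : String) (bad_features : List String) (catchall : String) : Decidable (Pre_get_target_feature feature bad_features catchall) := by unfold Pre_get_target_feature; infer_instance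
def pvWitness_get_target_feature : String × List String × String := ("spice-sum", ["spice-all"], "all")

def Spec_get_target_feature (feature : String) (bad_features : List String) (catchall : String) (out : String) : Prop := out = get_target_feature_alt feature bad_features catchall
instance (feature : String) (bad_features : List String) (catchall : String) (out : String) : Decidable (Spec_get_target_feature feature bad_features catchall out) := by unfold Spec_get_target_feature; infer_instance

-- ===== CLAIM =====
def Claim_equal_get_target_feature : Prop := ∀ (feature : String) (bad_features : List String) (catchall : String), Dom_get_target_feature feature bad_features catchall → Pre_get_target_feature feature bad_features catchall → Spec_get_target_feature feature bad_features catchall (get_target_feature feature bad_features catchall)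

-- ===== LEMMAS AND PROOFS =====

theorem hS_ne_nil (t : List Char) : hS t ≠ [] := by
  cases t with
  | nil => simp [hS]
  | cons a t => simp only [hS]; split <;> simp

theorem hS_cons_headI_tail (t : List Char) : (hS t).headI :: (hS t).tail = hS t := by
  cases hs : hS t with
  | nil => exact absurd hs (hS_ne_nil t)
  | cons x r => simp

theorem prefix_hyphen (l : List Char) : (['-'].isPrefixOf l) = (l.head? == some '-') := by
  cases l with
  | nil => simp [List.isPrefixOf]
  | cons a t =>
    simp only [List.isPrefixOf, List.head?_cons]
    by_cases h : a = '-' <;> simp [h, BEq.comm]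

theorem splitOn_go_eq (l : List Char) : ∀ (fuel : Nat) (cur : List Char) (acc : List (List Char)),
    l.length < fuel →
    PySem.Chars.splitOn.go ['-'] fuel l cur acc
      = acc.reverse ++ (cur.reverse ++ (hS l).headI) :: (hS l).tail := by
  induction l with
  | nil =>
    intro fuel cur acc hf
    cases fuel with
    | zero => omega
    | succ f => simp [PySem.Chars.splitOn.go, hS]
  | cons a rest ih =>
    intro fuel cur acc hf
    cases fuel with
    | zero => omega
    | succ f =>
      rw [PySem.Chars.splitOn.go]
      by_cases ha : a = '-'
      · rw [if_pos (by simp [ha])]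
        simp only [List.length_singleton, List.drop_succ_cons, List.drop_zero]
        rw [ih f [] (cur.reverse :: acc) (by simp at hf; omega)]
        simp [hS, ha, hS_cons_headI_tail]
      · rw [if_neg (by simp [prefix_hyphen]; exact ha)]
        rw [ih f (a :: cur) acc (by simp at hf; omega)]
        simp [hS, ha]

theorem splitOn_eq_hS (t : List Char) : PySem.Chars.splitOn t ['-'] = hS t := by
  unfold PySem.Chars.splitOn
  rw [splitOn_go_eq t (t.length + 1) [] [] (by omega)]
  simp [hS_cons_headI_tail]

theorem hS_no_hyphen (t : List Char) (h : '-' ∉ t) : hS t = [t] := by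
  induction t with
  | nil => simp [hS]
  | cons a t ih =>
    simp only [List.mem_cons] at h
    push Not at h
    have ha : ¬ a = '-' := fun e => h.1 e.symm
    simp [hS, ha, ih h.2]

theorem headI_mem' {α : Type} [Inhabited α] (l : List α) (h : l ≠ []) : l.headI ∈ l := by
  cases l with
  | nil => exact absurd rfl h
  | cons a t => simp

theorem hS_parts_no_hyphen (t : List Char) : ∀ p ∈ hS t, '-' ∉ p := by
  induction t with
  | nil => simp [hS]
  | cons a t ih =>
    by_cases ha : a = '-'
    · simp only [hS, if_pos ha]
      intro p hp
      rcases List.mem_cons.mp hp with e | e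
      · simp [e]
      · exact ih p e
    · simp only [hS, if_neg ha]
      intro p hp
      rcases List.mem_cons.mp hp with e | e
      · subst e
        simp only [List.mem_cons]
        push Not
        refine ⟨fun e => ha e.symm, ?_⟩
        exact ih _ (headI_mem' _ (hS_ne_nil t))
      · exact ih p (by rw [← hS_cons_headI_tail t]; exact List.mem_cons_of_mem _ e)

theorem join_cons_ne (x : List Char) (ys : List (List Char)) (h : ys ≠ []) :
    PySem.Chars.join ['-'] (x :: ys) = x ++ ['-'] ++ PySem.Chars.join ['-'] ys := by
  cases ys with
  | nil => exact absurd rfl h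
  | cons y r => exact PySem.Chars.join_cons_cons ['-'] x y r

theorem join_hS (t : List Char) : PySem.Chars.join ['-'] (hS t) = t := by
  induction t with
  | nil => simp [hS, PySem.Chars.join, List.intercalate]
  | cons a t ih =>
    by_cases ha : a = '-'
    · simp only [hS, if_pos ha]
      rw [join_cons_ne _ _ (hS_ne_nil t), ih]
      simp [ha]
    · simp only [hS, if_neg ha]
      have h := ih
      rw [← hS_cons_headI_tail t] at h
      cases htl : (hS t).tail with
      | nil =>
        rw [htl] at h
        simp only [PySem.Chars.join, List.intercalate] at h ⊢
        simpa using h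
      | cons y r =>
        rw [htl] at h
        rw [join_cons_ne _ _ (by simp)] at h ⊢
        simpa using h

theorem hS_prepend (x r : List Char) (hx : '-' ∉ x) : hS (x ++ '-' :: r) = x :: hS r := by
  induction x with
  | nil => simp [hS]
  | cons a x ih =>
    simp only [List.mem_cons] at hx
    push Not at hx
    have ha : ¬ a = '-' := fun e => hx.1 e.symm
    have h := ih hx.2
    simp [hS, ha, h]

theorem hS_join_append (xs : List (List Char)) (c : List Char)
    (hxs : ∀ p ∈ xs, '-' ∉ p) :
    hS (PySem.Chars.join ['-'] (xs ++ [c])) = xs ++ hS c := by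
  induction xs with
  | nil => simp [PySem.Chars.join, List.intercalate]
  | cons x xs ih =>
    rw [List.cons_append, join_cons_ne _ _ (by simp)]
    have hx : '-' ∉ x := hxs x List.mem_cons_self
    rw [List.append_assoc, List.singleton_append, hS_prepend _ _ hx,
      ih (fun p hp => hxs p (List.mem_cons_of_mem _ hp))]
    rfl

theorem pySetD_neg_one {α : Type} (l : List α) (v : α) (h : l ≠ []) :
    PySem.List.pySetD l (-1) v = l.dropLast ++ [v] := by
  have hlen : 1 ≤ l.length := List.length_pos_iff.mpr h
  have hidx : PySem.List.pyIdx? l.length (-1) = some (l.length - 1) := by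
    simp [PySem.List.pyIdx?]; omega
  have : PySem.List.pySetD l (-1) v = l.set (l.length - 1) v := by
    simp [PySem.List.pySetD, PySem.List.pySet?, hidx]
  rw [this]
  clear hidx this
  induction l with
  | nil => simp at h
  | cons x l ih =>
    cases l with
    | nil => simp
    | cons y r =>
      simp only [List.length_cons, Nat.add_sub_cancel, List.set_cons_succ,
        List.dropLast_cons₂, List.cons_append]
      have := ih (by simp) (by simp)
      simp only [List.length_cons, Nat.add_sub_cancel] at this
      rw [this]

theorem getLastD_of_ne_nil {α : Type} (l : List α) (h : l ≠ []) (d : α) :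
    l.getLast h = l.getLastD d := by
  rw [List.getLastD_eq_getLast?, List.getLast?_eq_some_getLast h]
  rfl

-- A's one round computes exactly pvStep
theorem stepA_eq (t c : List Char) : gtfAstep t c = pvStep t c := by
  unfold pvStep
  simp only [gtfAstep, splitOn_eq_hS]
  rw [PySem.List.pyGetD_neg_one _ _ (hS_ne_nil t),
    pySetD_neg_one _ _ (hS_ne_nil t), PySem.List.pyGetD_zero,
    getLastD_of_ne_nil _ (hS_ne_nil t) [], ← hS_cons_headI_tail t]
  rfl

-- B's one round keeps the invariant 'parts = hS target' and joins to pvStep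
theorem stepB_hS (t c : List Char) :
    gtfBupdate (hS c) c (hS t) = hS (pvStep t c) := by
  unfold gtfBupdate pvStep
  rw [PySem.List.pyGetD_neg_one _ _ (hS_ne_nil t), getLastD_of_ne_nil _ (hS_ne_nil t) []]
  by_cases h : (hS t).getLastD [] = c
  · rw [if_pos h, if_pos h]
    have h1 : PySem.List.slice (hS t) none (some 1) = (hS t).take 1 := by
      have := PySem.List.slice_to_natCast (hS t) 1
      simpa using this
    rw [h1, hS_no_hyphen _ (hS_parts_no_hyphen t _ (headI_mem' _ (hS_ne_nil t)))]
    conv_lhs => rw [← hS_cons_headI_tail t]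
    simp
  · rw [if_neg h, if_neg h, PySem.List.slice_to_neg_one,
      hS_join_append _ _ (fun p hp => hS_parts_no_hyphen t p (List.dropLast_subset _ hp))]

theorem go_eq (b : List (List Char)) (c : List Char) (n : Nat) : ∀ (t : List Char),
    gtfAgo b c n t = gtfBgo (PySem.Set.ofList b) c (hS c) n (hS t) := by
  induction n with
  | zero => intro t; simp [gtfAgo, gtfBgo, join_hS]
  | succ n ih =>
    intro t
    simp only [gtfAgo, gtfBgo, stepB_hS, join_hS, stepA_eq]
    by_cases h : pvStep t c ∈ b
    · rw [if_pos h, if_pos ((PySem.Set.mem_ofList b _).mpr h), ih]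
    · rw [if_neg h, if_neg (fun hc => h ((PySem.Set.mem_ofList b _).mp hc))]

-- ===== VERDICT =====
theorem get_target_feature_spec : Claim_equal_get_target_feature := by
  intro f b c _ _
  unfold Spec_get_target_feature get_target_feature get_target_feature_alt
  rw [splitOn_eq_hS, splitOn_eq_hS, go_eq]
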